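-- pv_equiv track=rewrite | github.com/RhemJos/parsing-unu | main.py | filter_section_b1
-- ===== SOURCE A (Python) =====
-- def normalize_for_match(text: str) -> str:
--     """Normaliza texto para comparaciones robustas."""
--     return " ".join(text.upper().split())
--
-- def is_b1_start(text: str) -> bool:
--     """
--     Detecta el inicio de la sub-sección B.1
--     """
--     t = normalize_for_match(text)
--
--     return (
--         t == "B.1."
--         or "PART B.1" in t
--         or "B.1." in t
--     )
--
-- def is_b1_end(text: str) -> bool:
--     """
--     Detecta el final de la sub-sección B.1
--     """
--     t = normalize_for_match(text)
--
--     return (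
--         "B.2." in t
--         or "PART C" in t
--         or "C.1." in t
--     )
--
-- def filter_section_b1(lines: list[dict]) -> list[dict]:
--     """
--     Filtra solo las líneas pertenecientes a la sección B.1
--     usando encabezados textuales, sin depender de páginas.
--     """
--     filtered = []
--     in_b1 = False
--
--     for line in lines:
--         text = line["text"]
--
--         if not in_b1 and is_b1_start(text):
--             in_b1 = True
--             continue
--
--         if in_b1 and is_b1_end(text):
--             break
--
--         if in_b1:
--             filtered.append(line)
--
--     return filtered
-- ===== SOURCE B (Python) =====
-- def normalize_for_match(text: str) -> str:
--     """Normaliza texto para comparaciones robustas."""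
--     return " ".join(text.upper().split())
--
-- def is_b1_start(text: str) -> bool:
--     t = normalize_for_match(text)
--     return (
--         t == "B.1."
--         or "PART B.1" in t
--         or "B.1." in t
--     )
--
-- def is_b1_end(text: str) -> bool:
--     t = normalize_for_match(text)
--     return (
--         "B.2." in t
--         or "PART C" in t
--         or "C.1." in t
--     )
--
-- def filter_section_b1(lines: list[dict]) -> list[dict]:
--     """Index-and-slice version: compute the index lists of start and end
--     markers with comprehensions, then return a slice of the input; no
--     scanning state and no element-by-element accumulation."""
--     starts = [i for i, line in enumerate(lines) if is_b1_start(line["text"])]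
--     if not starts:
--         return []
--     body = lines[starts[0] + 1:]
--     ends = [i for i, line in enumerate(body) if is_b1_end(line["text"])]
--     if not ends:
--         return body
--     return body[:ends[0]]
-- ===== Notes on version B (the rewrite author's own statement) =====
-- stated objective: alternative
-- what changed: Replaces the flag-driven scan-and-accumulate state machine with index arithmetic: two comprehensions compute the index lists of start and end markers, and the result is a single slice lines[start+1:][:end] of the input instead of element-by-element appends.
-- outside the precondition, e.g. on filter_section_b1([{'text': 'B.1.'}, {'text': 'B.2.'}, {}]): A returns [], B raises KeyError
import Mathlib
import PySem

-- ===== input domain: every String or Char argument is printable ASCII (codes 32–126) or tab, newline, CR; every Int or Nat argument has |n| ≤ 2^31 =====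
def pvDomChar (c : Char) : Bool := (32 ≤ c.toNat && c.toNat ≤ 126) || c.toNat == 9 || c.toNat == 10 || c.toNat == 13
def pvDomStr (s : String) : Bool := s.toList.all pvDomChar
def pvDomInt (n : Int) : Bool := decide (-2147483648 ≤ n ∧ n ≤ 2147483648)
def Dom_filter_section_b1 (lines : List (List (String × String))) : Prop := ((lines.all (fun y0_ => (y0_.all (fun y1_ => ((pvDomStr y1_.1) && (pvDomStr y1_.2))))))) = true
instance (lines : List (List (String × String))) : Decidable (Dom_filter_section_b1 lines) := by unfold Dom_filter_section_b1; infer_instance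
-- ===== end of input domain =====

-- B replaces A's flag-driven scan-and-accumulate state machine with index arithmetic:
-- it computes the index lists of start/end markers by comprehension and returns a slice
-- of the input; equivalence of return values is proved (objective: alternative).

-- ===== PORT A =====
-- line["text"]: Pre_ guarantees the key is present (Python raises KeyError otherwise)
def pvText (d : List (String × String)) : String :=
  ((PySem.Dict.mk d).get? "text").getD ""

def normalize_for_match (text : String) : String :=
  PySem.Str.join " " (PySem.Str.split₀ (PySem.Str.upper text))

def is_b1_start (text : String) : Bool :=
  let t := normalize_for_match text
  t == "B.1." || PySem.Str.isIn "PART B.1" t || PySem.Str.isIn "B.1." t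

def is_b1_end (text : String) : Bool :=
  let t := normalize_for_match text
  PySem.Str.isIn "B.2." t || PySem.Str.isIn "PART C" t || PySem.Str.isIn "C.1." t

def filterGoA : List (List (String × String)) → Bool → List (List (String × String)) → List (List (String × String))
  | [], _, filtered => filtered
  | line :: rest, in_b1, filtered =>
    let text := pvText line
    if !in_b1 && is_b1_start text then
      filterGoA rest true filtered
    else if in_b1 && is_b1_end text then
      filtered
    else if in_b1 then
      filterGoA rest in_b1 (filtered ++ [line])
    else
      filterGoA rest in_b1 filtered

def filter_section_b1 (lines : List (List (String × String))) : List (List (String × String)) :=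
  filterGoA lines false []

-- ===== PORT B =====
-- starts = [i for i, line in enumerate(lines) if is_b1_start(line["text"])]
def startIdxs (lines : List (List (String × String))) : List Int :=
  ((PySem.List.enumerate lines 0).filter (fun p => is_b1_start (pvText p.2))).map (fun p => p.1)

-- ends = [i for i, line in enumerate(body) if is_b1_end(line["text"])]
def endIdxs (body : List (List (String × String))) : List Int :=
  ((PySem.List.enumerate body 0).filter (fun p => is_b1_end (pvText p.2))).map (fun p => p.1)

def filter_section_b1_alt (lines : List (List (String × String))) : List (List (String × String)) :=
  match startIdxs lines with
  | [] => []
  | s :: _ =>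
    let body := PySem.List.slice lines (some (s + 1)) none
    match endIdxs body with
    | [] => body
    | e :: _ => PySem.List.slice body none (some e)

-- ===== PRECONDITION & SPEC =====
-- Pre_ excludes inputs with a line lacking the "text" key, on which Python A raises KeyError;
-- it is slightly narrower than A's domain: a key-less line occurring only after the B.1 end
-- marker is never read by A (A returns there), while B's comprehensions read every line and
-- raise KeyError.
def Pre_filter_section_b1 (lines : List (List (String × String))) : Prop :=
  ∀ d ∈ lines, (PySem.Dict.mk d).contains "text" = true
instance (lines : List (List (String × String))) : Decidable (Pre_filter_section_b1 lines) := by unfold Pre_filter_section_b1; infer_instance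

def pvWitness_filter_section_b1 : (List (List (String × String))) :=
  [[("text", "B.1.")], [("text", "hello")], [("text", "B.2.")]]

def Spec_filter_section_b1 (lines : List (List (String × String))) (out : List (List (String × String))) : Prop := out = filter_section_b1_alt lines
instance (lines : List (List (String × String))) (out : List (List (String × String))) : Decidable (Spec_filter_section_b1 lines out) := by unfold Spec_filter_section_b1; infer_instance

-- ===== CLAIM (what is proved, stated in full; the proofs are below) =====
def Claim_equal_filter_section_b1 : Prop := ∀ (lines : List (List (String × String))), Dom_filter_section_b1 lines → Pre_filter_section_b1 lines → Spec_filter_section_b1 lines (filter_section_b1 lines)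

-- ===== LEMMAS AND PROOFS =====
-- proof-only reference functions: A's loop after/before the flag is set
def dropToStart : List (List (String × String)) → List (List (String × String))
  | [] => []
  | line :: rest => if is_b1_start (pvText line) then rest else dropToStart rest

def takeToEnd : List (List (String × String)) → List (List (String × String))
  | [] => []
  | line :: rest => if is_b1_end (pvText line) then [] else line :: takeToEnd rest

-- once the flag is set, A's remaining loop is takeToEnd (accumulator pulled out front)
lemma filterGoA_true (rest : List (List (String × String))) :
    ∀ acc, filterGoA rest true acc = acc ++ takeToEnd rest := by
  induction rest with
  | nil => intro acc; simp [filterGoA, takeToEnd]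
  | cons l t ih =>
    intro acc
    by_cases h : is_b1_end (pvText l) = true <;>
      simp [filterGoA, takeToEnd, h, ih]

-- before the flag is set, A's loop is dropToStart followed by takeToEnd
lemma filterGoA_false (lines : List (List (String × String))) :
    filterGoA lines false [] = takeToEnd (dropToStart lines) := by
  induction lines with
  | nil => simp [filterGoA, dropToStart, takeToEnd]
  | cons l t ih =>
    by_cases h : is_b1_start (pvText l) = true <;>
      simp [filterGoA, dropToStart, h, ih, filterGoA_true]

-- enumerate with a shifted start is a map over enumerate from 0
lemma enumerate_shift {α : Type} (xs : List α) :
    ∀ s t : Int, PySem.List.enumerate xs (s + t) =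
      (PySem.List.enumerate xs t).map (fun p => (s + p.1, p.2)) := by
  induction xs with
  | nil => intro s t; simp [PySem.List.enumerate]
  | cons x xs ih =>
    intro s t
    rw [PySem.List.enumerate_cons, PySem.List.enumerate_cons]
    simp only [List.map_cons]
    rw [show s + t + 1 = s + (t + 1) by ring, ih]

lemma map_fst_filter_shift {p : Type} (P : p → Bool) :
    ∀ l : List (Int × p),
      ((l.map (fun q => ((1:Int) + q.1, q.2))).filter (fun q => P q.2)).map (fun q => q.1)
      = ((l.filter (fun q => P q.2)).map (fun q => q.1)).map (fun i => i + 1) := by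
  intro l
  induction l with
  | nil => simp
  | cons x xs ih =>
    by_cases h : P x.2 = true
    · simp only [List.map_cons, List.filter_cons, h, if_pos, List.map_cons]
      rw [ih]
      simp [add_comm]
    · simp only [List.map_cons, List.filter_cons, h, Bool.false_eq_true, if_false]
      exact ih

lemma idxs_cons (pred : String → Bool) (a : List (String × String))
    (t : List (List (String × String))) :
    ((PySem.List.enumerate (a :: t) 0).filter (fun p => pred (pvText p.2))).map (fun p => p.1)
    = (if pred (pvText a)
        then (0 : Int) :: (((PySem.List.enumerate t 0).filter (fun p => pred (pvText p.2))).map (fun p => p.1)).map (fun i => i + 1)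
        else (((PySem.List.enumerate t 0).filter (fun p => pred (pvText p.2))).map (fun p => p.1)).map (fun i => i + 1)) := by
  rw [PySem.List.enumerate_cons, show (0 : Int) + 1 = 1 + 0 by ring, enumerate_shift,
      List.filter_cons]
  by_cases h : pred (pvText a) = true <;>
    simp [h, map_fst_filter_shift (fun s => pred (pvText s))]

-- every index produced by the comprehensions is nonnegative
lemma idxs_nonneg (pred : String → Bool) (lines : List (List (String × String))) :
    ∀ i ∈ ((PySem.List.enumerate lines 0).filter (fun p => pred (pvText p.2))).map (fun p => p.1),
      0 ≤ i := by
  intro i hi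
  obtain ⟨p, hp, rfl⟩ := List.mem_map.mp hi
  have hmem := (List.mem_filter.mp hp).1
  rw [PySem.List.mem_enumerate_iff] at hmem
  obtain ⟨k, hk, rfl⟩ := hmem
  simp

-- dropToStart computes lines[starts[0]+1:] (or [] when there is no start marker)
lemma dropToStart_eq (lines : List (List (String × String))) :
    dropToStart lines = match startIdxs lines with
      | [] => []
      | s :: _ => PySem.List.slice lines (some (s + 1)) none := by
  induction lines with
  | nil => simp [dropToStart, startIdxs, PySem.List.enumerate]
  | cons a t ih =>
    unfold startIdxs at *
    rw [idxs_cons]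
    by_cases h : is_b1_start (pvText a) = true
    · simp [dropToStart, h, PySem.List.slice_from_one]
    · simp only [h, if_neg, Bool.not_eq_true]
      rw [show dropToStart (a :: t) = dropToStart t by simp [dropToStart, h]]
      rw [ih]
      cases hs : ((PySem.List.enumerate t 0).filter (fun p => is_b1_start (pvText p.2))).map (fun p => p.1) with
      | nil => simp
      | cons s r =>
        simp only [List.map_cons]
        have hnn : 0 ≤ s := idxs_nonneg _ t s (by rw [hs]; exact List.mem_cons_self ..)
        obtain ⟨n, rfl⟩ := Int.eq_ofNat_of_zero_le hnn
        rw [show ((n : Int) + 1 + 1) = ((n + 2 : Nat) : Int) by push_cast; ring,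
            show ((n : Int) + 1) = ((n + 1 : Nat) : Int) by push_cast; ring,
            PySem.List.slice_from_natCast, PySem.List.slice_from_natCast]
        simp [List.drop_succ_cons]

-- takeToEnd computes body[:ends[0]] (or body when there is no end marker)
lemma takeToEnd_eq (body : List (List (String × String))) :
    takeToEnd body = match endIdxs body with
      | [] => body
      | e :: _ => PySem.List.slice body none (some e) := by
  induction body with
  | nil => simp [takeToEnd, endIdxs, PySem.List.enumerate]
  | cons a t ih =>
    unfold endIdxs at *
    rw [idxs_cons]
    by_cases h : is_b1_end (pvText a) = true
    · rw [show takeToEnd (a :: t) = [] by simp [takeToEnd, h]]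
      simp only [h, if_true]
      rw [show (0 : Int) = ((0 : Nat) : Int) from rfl, PySem.List.slice_to_natCast]
      simp
    · simp only [h, if_neg, Bool.not_eq_true]
      rw [show takeToEnd (a :: t) = a :: takeToEnd t by simp [takeToEnd, h]]
      rw [ih]
      cases hs : ((PySem.List.enumerate t 0).filter (fun p => is_b1_end (pvText p.2))).map (fun p => p.1) with
      | nil => simp
      | cons e r =>
        simp only [List.map_cons]
        have hnn : 0 ≤ e := idxs_nonneg _ t e (by rw [hs]; exact List.mem_cons_self ..)
        obtain ⟨n, rfl⟩ := Int.eq_ofNat_of_zero_le hnn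
        rw [show ((n : Int) + 1) = ((n + 1 : Nat) : Int) by push_cast; ring,
            PySem.List.slice_to_natCast, PySem.List.slice_to_natCast]
        simp [List.take_succ_cons]

-- ===== VERDICT (by name: the statement is the Claim_ definition above) =====
theorem filter_section_b1_spec : Claim_equal_filter_section_b1 := by
  intro lines _ _
  unfold Spec_filter_section_b1 filter_section_b1 filter_section_b1_alt
  rw [filterGoA_false, dropToStart_eq]
  cases startIdxs lines with
  | nil => simp [takeToEnd]
  | cons s _ => exact takeToEnd_eq _
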